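-- pv_equiv track=rewrite | github.com/oublalkhalid/TimeCSL | src_timecsl/utils.py | get_experiment_seeds
-- ===== SOURCE A (Python) =====
-- def get_experiment_seeds(nb_representations, nb_runs):
--     ''' Extract all seeds to use in the experiment
--
--     :param nb_representations:      number of random representations to generate
--     :param nb_runs:                 number of times we run the metric on the same random representation
--     '''
--     # seeds corresponding to different random representations
--     repr_seeds = [repr_seed for repr_seed in range(nb_representations)]
--
--     # seeds corresponding to the experiment runs
--     # each pair of representation/run has a unique seed
--     # it allows to take into account the stochasticity of the metrics
--     run_seeds = [run_seed for run_seed in range(nb_representations * nb_runs)]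
--
--     # combine representation seeds with their corresponding run seeds
--     seeds = [(repr_seed, run_seed)
--              for repr_idx, repr_seed in enumerate(repr_seeds)
--              for run_idx, run_seed in enumerate(run_seeds)
--              if repr_idx * nb_runs <= run_idx < (repr_idx + 1) * nb_runs]
--
--     return seeds
-- ===== SOURCE B (Python) =====
-- def get_experiment_seeds(nb_representations, nb_runs):
--     # Directly emit each representation's contiguous block of run seeds:
--     # representation r owns run seeds r*nb_runs .. (r+1)*nb_runs - 1.
--     return [(r, s)
--             for r in range(nb_representations)
--             for s in range(r * nb_runs, (r + 1) * nb_runs)]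
-- ===== Notes on version B (the rewrite author's own statement) =====
-- stated objective: faster
-- what changed: Replaces the nested enumerate-and-filter over all nb_representations*nb_runs run seeds per representation with direct emission of each representation's contiguous run-seed block range(r*nb_runs,(r+1)*nb_runs).
import Mathlib
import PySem

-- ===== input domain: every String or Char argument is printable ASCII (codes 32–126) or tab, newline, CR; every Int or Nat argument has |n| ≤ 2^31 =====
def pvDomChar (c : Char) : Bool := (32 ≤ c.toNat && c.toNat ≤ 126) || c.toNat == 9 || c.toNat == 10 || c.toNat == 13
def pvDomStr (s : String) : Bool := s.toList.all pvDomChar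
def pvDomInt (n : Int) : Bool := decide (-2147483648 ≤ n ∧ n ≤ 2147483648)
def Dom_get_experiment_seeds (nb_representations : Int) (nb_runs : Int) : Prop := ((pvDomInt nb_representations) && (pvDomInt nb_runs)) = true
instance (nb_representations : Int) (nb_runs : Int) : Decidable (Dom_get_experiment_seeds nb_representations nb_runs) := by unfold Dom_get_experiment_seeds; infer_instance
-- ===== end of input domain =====

-- B replaces A's nested enumerate-and-filter over every (repr, run-seed) pair with direct
-- emission of each representation's contiguous run-seed block: O(n*m) instead of O(n^2*m).


-- ===== PORT A =====
-- tail-recursive enumerate (same values as Python's enumerate / PySem.List.enumerate;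
-- accumulator form only so that #eval does not overflow the interpreter stack on long lists)
def pyEnumGo {α : Type} (xs : List α) (s : Int) (acc : List (Int × α)) : List (Int × α) :=
  match xs with
  | [] => acc.reverse
  | x :: rest => pyEnumGo rest (s + 1) ((s, x) :: acc)

def pyEnum {α : Type} (xs : List α) (s : Int) : List (Int × α) := pyEnumGo xs s []

def get_experiment_seeds (nb_representations : Int) (nb_runs : Int) : List (Int × Int) :=
  let repr_seeds := PySem.List.pyRange 0 nb_representations 1
  let run_seeds := PySem.List.pyRange 0 (nb_representations * nb_runs) 1
  (pyEnum repr_seeds 0).flatMap (fun p =>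
    (pyEnum run_seeds 0).filterMap (fun q =>
      if p.1 * nb_runs ≤ q.1 ∧ q.1 < (p.1 + 1) * nb_runs then some (p.2, q.2) else none))

-- ===== PORT B =====
def get_experiment_seeds_alt (nb_representations : Int) (nb_runs : Int) : List (Int × Int) :=
  (PySem.List.pyRange 0 nb_representations 1).flatMap (fun r =>
    (PySem.List.pyRange (r * nb_runs) ((r + 1) * nb_runs) 1).map (fun s => (r, s)))

-- ===== PRECONDITION & SPEC =====
def Spec_get_experiment_seeds (nb_representations : Int) (nb_runs : Int) (out : List (Int × Int)) : Prop := out = get_experiment_seeds_alt nb_representations nb_runs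
instance (nb_representations : Int) (nb_runs : Int) (out : List (Int × Int)) : Decidable (Spec_get_experiment_seeds nb_representations nb_runs out) := by unfold Spec_get_experiment_seeds; infer_instance

-- ===== CLAIM (what is proved, stated in full; the proofs are below) =====
def Claim_equal_get_experiment_seeds : Prop := ∀ (nb_representations : Int) (nb_runs : Int), Dom_get_experiment_seeds nb_representations nb_runs → Spec_get_experiment_seeds nb_representations nb_runs (get_experiment_seeds nb_representations nb_runs)

-- ===== LEMMAS AND PROOFS =====

theorem pyEnumGo_eq {α : Type} (xs : List α) (s : Int) (acc : List (Int × α)) :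
    pyEnumGo xs s acc = acc.reverse ++ PySem.List.enumerate xs s := by
  induction xs generalizing s acc with
  | nil => simp [pyEnumGo, PySem.List.enumerate]
  | cons x rest ih => simp [pyEnumGo, ih, PySem.List.enumerate_cons]

theorem pyEnum_eq {α : Type} (xs : List α) (s : Int) :
    pyEnum xs s = PySem.List.enumerate xs s := by
  simp [pyEnum, pyEnumGo_eq]

-- enumerate of range(a, b) pairs every element with itself
theorem enumerate_pyRange_diag (a b : Int) :
    PySem.List.enumerate (PySem.List.pyRange a b 1) a
      = (PySem.List.pyRange a b 1).map (fun x => (x, x)) := by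
  obtain ⟨k, hk⟩ : ∃ k : Nat, (b - a).toNat = k := ⟨_, rfl⟩
  induction k generalizing a with
  | zero =>
      rw [PySem.List.pyRange_one_eq_nil (by omega)]
      simp [PySem.List.enumerate]
  | succ k ih =>
      rw [PySem.List.pyRange_one_cons (by omega)]
      simp only [PySem.List.enumerate_cons, List.map_cons]
      rw [ih (a + 1) (by omega)]

-- filterMap of a window test over range(a, b) keeps exactly range(lo, hi)
theorem filterMap_window (a lo hi b : Int) (f : Int → Int × Int)
    (h1 : a ≤ lo) (h2 : lo ≤ hi) (h3 : hi ≤ b) :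
    (PySem.List.pyRange a b 1).filterMap
        (fun q => if lo ≤ q ∧ q < hi then some (f q) else none)
      = (PySem.List.pyRange lo hi 1).map f := by
  rw [PySem.List.pyRange_one_append a lo b h1 (by omega),
      PySem.List.pyRange_one_append lo hi b h2 h3,
      List.filterMap_append, List.filterMap_append]
  have hlow : (PySem.List.pyRange a lo 1).filterMap
      (fun q => if lo ≤ q ∧ q < hi then some (f q) else none) = [] := by
    rw [List.filterMap_eq_nil_iff]
    intro q hq
    rw [PySem.List.mem_pyRange_one] at hq
    simp only [if_neg (by omega : ¬ (lo ≤ q ∧ q < hi))]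
  have hhigh : (PySem.List.pyRange hi b 1).filterMap
      (fun q => if lo ≤ q ∧ q < hi then some (f q) else none) = [] := by
    rw [List.filterMap_eq_nil_iff]
    intro q hq
    rw [PySem.List.mem_pyRange_one] at hq
    simp only [if_neg (by omega : ¬ (lo ≤ q ∧ q < hi))]
  have hmid : (PySem.List.pyRange lo hi 1).filterMap
      (fun q => if lo ≤ q ∧ q < hi then some (f q) else none)
      = (PySem.List.pyRange lo hi 1).map f := by
    rw [List.filterMap_congr (g := fun q => some (f q)) ?_]
    · simp
    intro q hq
    rw [PySem.List.mem_pyRange_one] at hq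
    simp only [if_pos (by omega : lo ≤ q ∧ q < hi)]
  rw [hlow, hhigh, hmid]
  simp

theorem flatMap_congr_mem {α β : Type} (l : List α) (f g : α → List β)
    (h : ∀ x ∈ l, f x = g x) : l.flatMap f = l.flatMap g := by
  induction l with
  | nil => rfl
  | cons x xs ih =>
      simp only [List.flatMap_cons, h x (by simp), ih (fun y hy => h y (by simp [hy]))]

-- ===== VERDICT (by name: the statement is the Claim_ definition above) =====
theorem get_experiment_seeds_spec : Claim_equal_get_experiment_seeds := by
  intro n m _
  unfold Spec_get_experiment_seeds get_experiment_seeds get_experiment_seeds_alt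
  simp only [pyEnum_eq, enumerate_pyRange_diag, List.flatMap_map, List.filterMap_map, Function.comp]
  apply flatMap_congr_mem
  intro r hr
  rw [PySem.List.mem_pyRange_one] at hr
  by_cases hm : 0 < m
  · exact filterMap_window 0 (r * m) ((r + 1) * m) (n * m) (fun q => (r, q))
      (by nlinarith) (by nlinarith) (by nlinarith)
  · -- nb_runs ≤ 0: both the global run-seed range and r's block are empty
    rw [PySem.List.pyRange_one_eq_nil (show n * m ≤ 0 by nlinarith),
        PySem.List.pyRange_one_eq_nil (show (r + 1) * m ≤ r * m by nlinarith)]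
    simp
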